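-- pv_equiv track=rewrite | github.com/q404365631/open-range | src/open_range/validator/path_solvability.py | _reachable_from_any
-- ===== SOURCE A (Python) =====
-- from collections import defaultdict, deque
--
-- def _reachable_from_any(
--     target: str,
--     starts: set[str],
--     adjacency: dict[str, set[str]],
-- ) -> bool:
--     for start in starts:
--         if start == target:
--             return True
--         if _has_path(start, target, adjacency):
--             return True
--     return False
--
-- def _has_path(start: str, target: str, adjacency: dict[str, set[str]]) -> bool:
--     queue: deque[str] = deque([start])
--     seen = {start}
--     while queue:
--         current = queue.popleft()
--         for neighbor in adjacency.get(current, set()):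
--             if neighbor == target:
--                 return True
--             if neighbor in seen:
--                 continue
--             seen.add(neighbor)
--             queue.append(neighbor)
--     return False
-- ===== SOURCE B (Python) =====
-- from collections import deque
--
-- def _reachable_from_any(
--     target: str,
--     starts: set[str],
--     adjacency: dict[str, set[str]],
-- ) -> bool:
--     # Single multi-source BFS: seed the queue with every start at once,
--     # test for the target when a node is dequeued.
--     queue = deque(starts)
--     seen = set(starts)
--     while queue:
--         current = queue.popleft()
--         if current == target:
--             return True
--         for neighbor in adjacency.get(current, set()):
--             if neighbor not in seen:
--                 seen.add(neighbor)
--                 queue.append(neighbor)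
--     return False
-- ===== Notes on version B (the rewrite author's own statement) =====
-- stated objective: faster
-- what changed: Replaces the per-start loop that runs a fresh BFS from each start with a single multi-source BFS seeded with all starts at once, testing the target at dequeue time.
import Mathlib
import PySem

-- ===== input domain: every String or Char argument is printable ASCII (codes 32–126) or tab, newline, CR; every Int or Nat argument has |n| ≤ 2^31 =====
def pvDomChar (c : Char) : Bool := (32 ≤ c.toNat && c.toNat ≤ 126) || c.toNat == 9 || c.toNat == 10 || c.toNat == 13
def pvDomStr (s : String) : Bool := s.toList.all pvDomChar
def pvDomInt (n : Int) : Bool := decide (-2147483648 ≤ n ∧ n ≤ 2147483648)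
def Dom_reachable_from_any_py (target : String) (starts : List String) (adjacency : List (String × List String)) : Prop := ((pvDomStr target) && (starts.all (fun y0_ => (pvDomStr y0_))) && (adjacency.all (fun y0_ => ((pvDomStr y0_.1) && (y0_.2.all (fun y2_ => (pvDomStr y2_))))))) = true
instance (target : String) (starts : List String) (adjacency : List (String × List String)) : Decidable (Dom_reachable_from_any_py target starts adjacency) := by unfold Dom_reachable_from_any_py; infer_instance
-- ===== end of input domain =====

-- B replaces A's per-start BFS loop (O(S·(V+E))) by one multi-source BFS seeded
-- with every start at once; objective: faster (asymptotic).

-- ===== PORT A =====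

-- adjacency.get(current, set())
def pvNeigh (adjacency : List (String × List String)) (u : String) : List String :=
  PySem.Dict.getD (PySem.Dict.mk adjacency) u []

-- the body of A's `for neighbor in adjacency.get(current, set())` loop:
-- none = `return True` was hit, some (queue, seen) = the updated state
def pvScanA (target : String) : List String → List String → List String → Option (List String × List String)
  | [], queue, seen => some (queue, seen)
  | n :: ns, queue, seen =>
    if n = target then none
    else if PySem.Set.contains seen n then pvScanA target ns queue seen
    else pvScanA target ns (queue ++ [n]) (PySem.Set.add seen n)

-- A's `while queue` loop; the fuel only makes the recursion structural: it bounds the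
-- number of dequeues, and the proofs show it is never exhausted before the queue empties.
def pvHasPathAux (target : String) (adjacency : List (String × List String)) : Nat → List String → List String → Bool
  | _, [], _ => false
  | 0, _ :: _, _ => false
  | fuel + 1, current :: queue, seen =>
    match pvScanA target (pvNeigh adjacency current) queue seen with
    | none => true
    | some (queue', seen') => pvHasPathAux target adjacency fuel queue' seen'

def pvHasPath (start : String) (target : String) (adjacency : List (String × List String)) : Bool :=
  pvHasPathAux target adjacency (1 + (adjacency.flatMap Prod.snd).length) [start] (PySem.Set.ofList [start])

-- A's `for start in starts` loop with its two early returns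
def pvAnyStart (target : String) (adjacency : List (String × List String)) : List String → Bool
  | [] => false
  | s :: rest =>
    if s = target then true
    else if pvHasPath s target adjacency then true
    else pvAnyStart target adjacency rest

def reachable_from_any_py (target : String) (starts : List String) (adjacency : List (String × List String)) : Bool :=
  pvAnyStart target adjacency starts

-- ===== PORT B =====

-- the body of B's `for neighbor in adjacency.get(current, set())` loop (no early return)
def pvPushB : List String → List String → List String → List String × List String
  | [], queue, seen => (queue, seen)
  | n :: ns, queue, seen =>
    if PySem.Set.contains seen n then pvPushB ns queue seen
    else pvPushB ns (queue ++ [n]) (PySem.Set.add seen n)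

-- B's `while queue` loop; fuel as in pvHasPathAux
def pvBfsAux (target : String) (adjacency : List (String × List String)) : Nat → List String → List String → Bool
  | _, [], _ => false
  | 0, _ :: _, _ => false
  | fuel + 1, current :: queue, seen =>
    if current = target then true
    else
      match pvPushB (pvNeigh adjacency current) queue seen with
      | (queue', seen') => pvBfsAux target adjacency fuel queue' seen'

def reachable_from_any_py_alt (target : String) (starts : List String) (adjacency : List (String × List String)) : Bool :=
  pvBfsAux target adjacency (starts.length + (adjacency.flatMap Prod.snd).length) starts (PySem.Set.ofList starts)

-- ===== PRECONDITION & SPEC =====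
def Spec_reachable_from_any_py (target : String) (starts : List String) (adjacency : List (String × List String)) (out : Bool) : Prop := out = reachable_from_any_py_alt target starts adjacency
instance (target : String) (starts : List String) (adjacency : List (String × List String)) (out : Bool) : Decidable (Spec_reachable_from_any_py target starts adjacency out) := by unfold Spec_reachable_from_any_py; infer_instance

-- ===== CLAIM (what is proved, stated in full; the proofs are below) =====
def Claim_equal_reachable_from_any_py : Prop := ∀ (target : String) (starts : List String) (adjacency : List (String × List String)), Dom_reachable_from_any_py target starts adjacency → Spec_reachable_from_any_py target starts adjacency (reachable_from_any_py target starts adjacency)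

-- ===== LEMMAS AND PROOFS =====

-- one edge of the graph
def pvStep (adjacency : List (String × List String)) (u v : String) : Prop := v ∈ pvNeigh adjacency u

lemma pvNeigh_cons (k : String) (v : List String) (rest : List (String × List String)) (u : String) :
    pvNeigh ((k, v) :: rest) u = if k == u then v else pvNeigh rest u := by
  simp only [pvNeigh, PySem.Dict.getD, PySem.Dict.get?_mk_cons]
  split <;> rfl

lemma pvNeigh_subset (adjacency : List (String × List String)) (u x : String)
    (h : x ∈ pvNeigh adjacency u) : x ∈ adjacency.flatMap Prod.snd := by
  induction adjacency with
  | nil => simp [show pvNeigh [] u = [] from rfl] at h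
  | cons p rest ih =>
    obtain ⟨k, v⟩ := p
    rw [pvNeigh_cons] at h
    simp only [List.flatMap_cons, List.mem_append]
    split at h
    · exact Or.inl h
    · exact Or.inr (ih h)

lemma pvSet_add_of_not_mem (s : List String) (x : String) (h : x ∉ s) :
    PySem.Set.add s x = s ++ [x] := by
  simp [PySem.Set.add]
  intro hc
  exact absurd hc h

-- the inner loop of A: if it exits with `return True`, the target is among the scanned neighbors
lemma pvScanA_none (target : String) :
    ∀ (ns queue seen : List String), pvScanA target ns queue seen = none → target ∈ ns := by
  intro ns
  induction ns with
  | nil => intro queue seen h; simp [pvScanA] at h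
  | cons n ns ih =>
    intro queue seen h
    by_cases hn : n = target
    · simp [hn]
    · simp only [pvScanA, if_neg hn] at h
      by_cases hc : PySem.Set.contains seen n
      · simp only [hc, if_true] at h
        exact List.mem_cons_of_mem _ (ih _ _ h)
      · simp only [hc, if_false, Bool.false_eq_true] at h
        exact List.mem_cons_of_mem _ (ih _ _ h)

-- the inner loop of A: a normal exit appends the same fresh elements to queue and seen
lemma pvScanA_some (target : String) :
    ∀ (ns queue seen queue' seen' : List String),
      pvScanA target ns queue seen = some (queue', seen') →
      ∃ new : List String, seen' = seen ++ new ∧ queue' = queue ++ new ∧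
        (∀ x ∈ new, x ∈ ns ∧ x ∉ seen) ∧
        (seen.Nodup → seen'.Nodup) ∧
        (∀ n ∈ ns, n ≠ target ∧ n ∈ seen') := by
  intro ns
  induction ns with
  | nil =>
    intro queue seen queue' seen' h
    simp [pvScanA] at h
    exact ⟨[], by simp [h.2.symm], by simp [h.1.symm], by simp, fun hn => h.2 ▸ hn, by simp⟩
  | cons n ns ih =>
    intro queue seen queue' seen' h
    by_cases hn : n = target
    · simp [pvScanA, hn] at h
    · simp only [pvScanA, if_neg hn] at h
      by_cases hc : PySem.Set.contains seen n
      · simp only [hc, if_true] at h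
        obtain ⟨new, h1, h2, h3, h4, h5⟩ := ih _ _ _ _ h
        have hmem : n ∈ seen := (PySem.Set.contains_iff seen n).mp hc
        refine ⟨new, h1, h2, fun x hx => ⟨List.mem_cons_of_mem _ (h3 x hx).1, (h3 x hx).2⟩, h4, ?_⟩
        intro m hm
        rcases List.mem_cons.mp hm with rfl | hm'
        · exact ⟨hn, by simp [h1]; exact Or.inl hmem⟩
        · exact h5 m hm'
      · simp only [hc, if_false, Bool.false_eq_true] at h
        have hnot : n ∉ seen := fun hmem => hc ((PySem.Set.contains_iff seen n).mpr hmem)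
        rw [pvSet_add_of_not_mem seen n hnot] at h
        obtain ⟨new, h1, h2, h3, h4, h5⟩ := ih _ _ _ _ h
        refine ⟨n :: new, by simpa using h1, by simpa using h2, ?_, ?_, ?_⟩
        · intro x hx
          rcases List.mem_cons.mp hx with rfl | hx'
          · exact ⟨List.mem_cons_self, hnot⟩
          · refine ⟨List.mem_cons_of_mem _ (h3 x hx').1, fun hxs => (h3 x hx').2 (by simp [hxs])⟩
        · intro hnd
          exact h4 (by simp [List.nodup_append, hnd]; exact fun a ha hne => hnot (hne ▸ ha))
        · intro m hm
          rcases List.mem_cons.mp hm with rfl | hm'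
          · exact ⟨hn, by simp [h1]⟩
          · exact h5 m hm'

-- the inner loop of B: same state description, and every scanned neighbor ends up in seen
lemma pvPushB_spec :
    ∀ (ns queue seen queue' seen' : List String),
      pvPushB ns queue seen = (queue', seen') →
      ∃ new : List String, seen' = seen ++ new ∧ queue' = queue ++ new ∧
        (∀ x ∈ new, x ∈ ns ∧ x ∉ seen) ∧
        (seen.Nodup → seen'.Nodup) ∧
        (∀ n ∈ ns, n ∈ seen') := by
  intro ns
  induction ns with
  | nil =>
    intro queue seen queue' seen' h
    simp [pvPushB] at h
    exact ⟨[], by simp [h.2.symm], by simp [h.1.symm], by simp, fun hn => h.2 ▸ hn, by simp⟩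
  | cons n ns ih =>
    intro queue seen queue' seen' h
    by_cases hc : PySem.Set.contains seen n
    · simp only [pvPushB, hc, if_true] at h
      obtain ⟨new, h1, h2, h3, h4, h5⟩ := ih _ _ _ _ h
      have hmem : n ∈ seen := (PySem.Set.contains_iff seen n).mp hc
      refine ⟨new, h1, h2, fun x hx => ⟨List.mem_cons_of_mem _ (h3 x hx).1, (h3 x hx).2⟩, h4, ?_⟩
      intro m hm
      rcases List.mem_cons.mp hm with rfl | hm'
      · simp [h1]; exact Or.inl hmem
      · exact h5 m hm'
    · simp only [pvPushB, hc, if_false, Bool.false_eq_true] at h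
      have hnot : n ∉ seen := fun hmem => hc ((PySem.Set.contains_iff seen n).mpr hmem)
      rw [pvSet_add_of_not_mem seen n hnot] at h
      obtain ⟨new, h1, h2, h3, h4, h5⟩ := ih _ _ _ _ h
      refine ⟨n :: new, by simpa using h1, by simpa using h2, ?_, ?_, ?_⟩
      · intro x hx
        rcases List.mem_cons.mp hx with rfl | hx'
        · exact ⟨List.mem_cons_self, hnot⟩
        · refine ⟨List.mem_cons_of_mem _ (h3 x hx').1, fun hxs => (h3 x hx').2 (by simp [hxs])⟩
      · intro hnd
        exact h4 (by simp [List.nodup_append, hnd]; exact fun a ha hne => hnot (hne ▸ ha))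
      · intro m hm
        rcases List.mem_cons.mp hm with rfl | hm'
        · simp [h1]
        · exact h5 m hm'

-- reachable nodes stay inside a seen-set that is closed under edges
lemma pvClosed_reach (adjacency : List (String × List String)) (seen : List String)
    (hclosed : ∀ v ∈ seen, ∀ n ∈ pvNeigh adjacency v, n ∈ seen)
    {a b : String} (h : Relation.ReflTransGen (pvStep adjacency) a b) (ha : a ∈ seen) :
    b ∈ seen := by
  induction h with
  | refl => exact ha
  | tail _ hstep ih => exact hclosed _ ih _ hstep

-- main invariant lemma for A's BFS loop
lemma pvHasPathAux_iff (target start : String) (adjacency : List (String × List String))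
    (U : List String)
    (hU : ∀ v x, x ∈ pvNeigh adjacency v → x ∈ U) :
    ∀ (fuel : Nat) (queue seen : List String),
      seen.Nodup →
      start ∈ seen →
      (∀ v ∈ seen, Relation.ReflTransGen (pvStep adjacency) start v) →
      (∀ v ∈ queue, v ∈ seen) →
      (∀ v ∈ seen, v ∉ queue → ∀ n ∈ pvNeigh adjacency v, n ≠ target ∧ n ∈ seen) →
      (∀ v ∈ seen, v ∈ U) →
      queue.length + (U.toFinset.card - seen.length) ≤ fuel →
      (pvHasPathAux target adjacency fuel queue seen = true ↔
        ∃ u, Relation.ReflTransGen (pvStep adjacency) start u ∧ target ∈ pvNeigh adjacency u) := by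
  intro fuel
  induction fuel with
  | zero =>
    intro queue seen hnd hstart hreach hq hclosed hsub hfuel
    have hqe : queue = [] := by
      cases queue with
      | nil => rfl
      | cons c q => simp at hfuel
    subst hqe
    simp only [pvHasPathAux, Bool.false_eq_true, false_iff]
    rintro ⟨u, hru, htu⟩
    have hu : u ∈ seen := pvClosed_reach adjacency seen
      (fun v hv n hn => (hclosed v hv (by simp) n hn).2) hru hstart
    exact (hclosed u hu (by simp) target htu).1 rfl
  | succ fuel ih =>
    intro queue seen hnd hstart hreach hq hclosed hsub hfuel
    cases queue with
    | nil =>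
      simp only [pvHasPathAux, Bool.false_eq_true, false_iff]
      rintro ⟨u, hru, htu⟩
      have hu : u ∈ seen := pvClosed_reach adjacency seen
        (fun v hv n hn => (hclosed v hv (by simp) n hn).2) hru hstart
      exact (hclosed u hu (by simp) target htu).1 rfl
    | cons current q =>
      have hcur : current ∈ seen := hq current (by simp)
      cases hscan : pvScanA target (pvNeigh adjacency current) q seen with
      | none =>
        simp only [pvHasPathAux, hscan, true_iff]
        exact ⟨current, hreach current hcur, pvScanA_none target _ _ _ hscan⟩
      | some st =>
        obtain ⟨queue', seen'⟩ := st
        obtain ⟨new, h1, h2, h3, h4, h5⟩ := pvScanA_some target _ _ _ _ _ hscan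
        simp only [pvHasPathAux, hscan]
        have hseenlen : seen.length ≤ U.toFinset.card := by
          calc seen.length = seen.toFinset.card := (List.toFinset_card_of_nodup hnd).symm
          _ ≤ U.toFinset.card := Finset.card_le_card (fun x hx => by
              simp only [List.mem_toFinset] at *; exact hsub x hx)
        have hnd' : seen'.Nodup := h4 hnd
        have hsub' : ∀ v ∈ seen', v ∈ U := by
          intro v hv
          rw [h1] at hv
          rcases List.mem_append.mp hv with hv | hv
          · exact hsub v hv
          · exact hU current v (h3 v hv).1
        have hseenlen' : seen'.length ≤ U.toFinset.card := by
          calc seen'.length = seen'.toFinset.card := (List.toFinset_card_of_nodup hnd').symm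
          _ ≤ U.toFinset.card := Finset.card_le_card (fun x hx => by
              simp only [List.mem_toFinset] at *; exact hsub' x hx)
        apply ih queue' seen' hnd' (by simp [h1]; exact Or.inl hstart) ?_ ?_ ?_ hsub' ?_
        · -- every seen' node is reachable from start
          intro v hv
          rw [h1] at hv
          rcases List.mem_append.mp hv with hv | hv
          · exact hreach v hv
          · exact (hreach current hcur).tail ((h3 v hv).1 : v ∈ pvNeigh adjacency current)
        · -- queue' ⊆ seen'
          intro v hv
          rw [h2] at hv
          rcases List.mem_append.mp hv with hv | hv
          · simp [h1]; exact Or.inl (hq v (List.mem_cons_of_mem _ hv))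
          · simp [h1, hv]
        · -- processed nodes are fully expanded
          intro v hv hvq
          rw [h1] at hv
          rcases List.mem_append.mp hv with hv | hv
          · by_cases hvc : v = current
            · subst hvc
              intro n hn
              exact h5 n hn
            · intro n hn
              have hvnotq : v ∉ current :: q := by
                intro hmem
                rcases List.mem_cons.mp hmem with h | h
                · exact hvc h
                · exact hvq (by simp [h2, h])
              obtain ⟨hne, hns⟩ := hclosed v hv hvnotq n hn
              exact ⟨hne, by simp [h1, hns]⟩
          · exact absurd (by simp [h2, hv] : v ∈ queue') hvq
        · -- fuel still suffices
          have hl1 : seen'.length = seen.length + new.length := by simp [h1]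
          have hl2 : queue'.length = q.length + new.length := by simp [h2]
          simp only [List.length_cons] at hfuel
          omega

-- main invariant lemma for B's multi-source BFS loop
lemma pvBfsAux_iff (target : String) (adjacency : List (String × List String))
    (starts : List String) (U : List String)
    (hU : ∀ v x, x ∈ pvNeigh adjacency v → x ∈ U) :
    ∀ (fuel : Nat) (queue seen : List String),
      seen.Nodup →
      (∀ s ∈ starts, s ∈ seen) →
      (∀ v ∈ seen, ∃ s ∈ starts, Relation.ReflTransGen (pvStep adjacency) s v) →
      (∀ v ∈ queue, v ∈ seen) →
      (∀ v ∈ seen, v ∉ queue → v ≠ target ∧ ∀ n ∈ pvNeigh adjacency v, n ∈ seen) →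
      (∀ v ∈ seen, v ∈ U) →
      queue.length + (U.toFinset.card - seen.length) ≤ fuel →
      (pvBfsAux target adjacency fuel queue seen = true ↔
        ∃ s ∈ starts, Relation.ReflTransGen (pvStep adjacency) s target) := by
  intro fuel
  induction fuel with
  | zero =>
    intro queue seen hnd hstarts horig hq hclosed hsub hfuel
    have hqe : queue = [] := by
      cases queue with
      | nil => rfl
      | cons c q => simp at hfuel
    subst hqe
    simp only [pvBfsAux, Bool.false_eq_true, false_iff]
    rintro ⟨s, hs, hr⟩
    have ht : target ∈ seen := pvClosed_reach adjacency seen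
      (fun v hv n hn => (hclosed v hv (by simp)).2 n hn) hr (hstarts s hs)
    exact (hclosed target ht (by simp)).1 rfl
  | succ fuel ih =>
    intro queue seen hnd hstarts horig hq hclosed hsub hfuel
    cases queue with
    | nil =>
      simp only [pvBfsAux, Bool.false_eq_true, false_iff]
      rintro ⟨s, hs, hr⟩
      have ht : target ∈ seen := pvClosed_reach adjacency seen
        (fun v hv n hn => (hclosed v hv (by simp)).2 n hn) hr (hstarts s hs)
      exact (hclosed target ht (by simp)).1 rfl
    | cons current q =>
      have hcur : current ∈ seen := hq current (by simp)
      by_cases hct : current = target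
      · simp only [pvBfsAux, if_pos hct, true_iff]
        obtain ⟨s, hs, hr⟩ := horig current hcur
        exact ⟨s, hs, hct ▸ hr⟩
      · simp only [pvBfsAux, if_neg hct]
        cases hp : pvPushB (pvNeigh adjacency current) q seen with
        | mk queue' seen' =>
        obtain ⟨new, h1, h2, h3, h4, h5⟩ := pvPushB_spec _ _ _ _ _ hp
        have hnd' : seen'.Nodup := h4 hnd
        have hsub' : ∀ v ∈ seen', v ∈ U := by
          intro v hv
          rw [h1] at hv
          rcases List.mem_append.mp hv with hv | hv
          · exact hsub v hv
          · exact hU current v (h3 v hv).1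
        have hseenlen : seen.length ≤ U.toFinset.card := by
          calc seen.length = seen.toFinset.card := (List.toFinset_card_of_nodup hnd).symm
          _ ≤ U.toFinset.card := Finset.card_le_card (fun x hx => by
              simp only [List.mem_toFinset] at *; exact hsub x hx)
        have hseenlen' : seen'.length ≤ U.toFinset.card := by
          calc seen'.length = seen'.toFinset.card := (List.toFinset_card_of_nodup hnd').symm
          _ ≤ U.toFinset.card := Finset.card_le_card (fun x hx => by
              simp only [List.mem_toFinset] at *; exact hsub' x hx)
        apply ih queue' seen' hnd' ?_ ?_ ?_ ?_ hsub' ?_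
        · intro s hs
          simp [h1]
          exact Or.inl (hstarts s hs)
        · intro v hv
          rw [h1] at hv
          rcases List.mem_append.mp hv with hv | hv
          · exact horig v hv
          · obtain ⟨s, hs, hr⟩ := horig current hcur
            exact ⟨s, hs, hr.tail ((h3 v hv).1 : v ∈ pvNeigh adjacency current)⟩
        · intro v hv
          rw [h2] at hv
          rcases List.mem_append.mp hv with hv | hv
          · simp [h1]; exact Or.inl (hq v (List.mem_cons_of_mem _ hv))
          · simp [h1, hv]
        · intro v hv hvq
          rw [h1] at hv
          rcases List.mem_append.mp hv with hv | hv
          · by_cases hvc : v = current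
            · subst hvc
              exact ⟨hct, fun n hn => h5 n hn⟩
            · have hvnotq : v ∉ current :: q := by
                intro hmem
                rcases List.mem_cons.mp hmem with h | h
                · exact hvc h
                · exact hvq (by simp [h2, h])
              obtain ⟨hne, hns⟩ := hclosed v hv hvnotq
              exact ⟨hne, fun n hn => by simp [h1]; exact Or.inl (hns n hn)⟩
          · exact absurd (by simp [h2, hv] : v ∈ queue') hvq
        · have hl1 : seen'.length = seen.length + new.length := by simp [h1]
          have hl2 : queue'.length = q.length + new.length := by simp [h2]
          simp only [List.length_cons] at hfuel
          omega

-- A's single-source BFS decides "some node with an edge to target is reachable from start"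
lemma pvHasPath_iff (start target : String) (adjacency : List (String × List String)) :
    pvHasPath start target adjacency = true ↔
      ∃ u, Relation.ReflTransGen (pvStep adjacency) start u ∧ target ∈ pvNeigh adjacency u := by
  have hU : ∀ v x, x ∈ pvNeigh adjacency v → x ∈ start :: adjacency.flatMap Prod.snd :=
    fun v x hx => List.mem_cons_of_mem _ (pvNeigh_subset adjacency v x hx)
  have hofl : PySem.Set.ofList [start] = [start] := rfl
  refine pvHasPathAux_iff target start adjacency _ hU _ [start] (PySem.Set.ofList [start])
    (hofl ▸ List.nodup_singleton start) (by simp [hofl]) ?_ (by simp [hofl]) ?_ (by simp [hofl]) ?_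
  · intro v hv
    rw [hofl, List.mem_singleton] at hv
    exact hv ▸ Relation.ReflTransGen.refl
  · intro v hv hvq
    rw [hofl, List.mem_singleton] at hv
    exact absurd (by simp [hv]) hvq
  · rw [hofl]
    have hc : (start :: adjacency.flatMap Prod.snd).toFinset.card ≤
        (start :: adjacency.flatMap Prod.snd).length := List.toFinset_card_le _
    simp only [List.length_cons, List.length_nil] at hc ⊢
    omega

-- A's outer loop over starts
lemma pvAnyStart_iff (target : String) (adjacency : List (String × List String)) :
    ∀ starts : List String,
      (pvAnyStart target adjacency starts = true ↔
        ∃ s ∈ starts, s = target ∨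
          ∃ u, Relation.ReflTransGen (pvStep adjacency) s u ∧ target ∈ pvNeigh adjacency u) := by
  intro starts
  induction starts with
  | nil => simp [pvAnyStart]
  | cons s rest ih =>
    by_cases hst : s = target
    · simp [pvAnyStart, hst]
    · by_cases hp : pvHasPath s target adjacency
      · simp only [pvAnyStart, if_neg hst, if_pos hp, true_iff]
        exact ⟨s, by simp, Or.inr ((pvHasPath_iff s target adjacency).mp hp)⟩
      · simp only [pvAnyStart, if_neg hst, if_neg hp]
        rw [ih]
        constructor
        · rintro ⟨m, hm, hprop⟩
          exact ⟨m, List.mem_cons_of_mem _ hm, hprop⟩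
        · rintro ⟨m, hm, hprop⟩
          rcases List.mem_cons.mp hm with rfl | hm'
          · rcases hprop with h | h
            · exact absurd h hst
            · exact absurd ((pvHasPath_iff m target adjacency).mpr h) hp
          · exact ⟨m, hm', hprop⟩

-- B decides "target is reachable (0 or more edges) from some start"
lemma pvAlt_iff (target : String) (starts : List String) (adjacency : List (String × List String)) :
    reachable_from_any_py_alt target starts adjacency = true ↔
      ∃ s ∈ starts, Relation.ReflTransGen (pvStep adjacency) s target := by
  have hU : ∀ v x, x ∈ pvNeigh adjacency v → x ∈ starts ++ adjacency.flatMap Prod.snd :=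
    fun v x hx => List.mem_append.mpr (Or.inr (pvNeigh_subset adjacency v x hx))
  refine pvBfsAux_iff target adjacency starts _ hU _ starts (PySem.Set.ofList starts)
    (PySem.Set.nodup_ofList starts) (fun s hs => (PySem.Set.mem_ofList starts s).mpr hs) ?_
    (fun v hv => (PySem.Set.mem_ofList starts v).mpr hv) ?_ ?_ ?_
  · intro v hv
    exact ⟨v, (PySem.Set.mem_ofList starts v).mp hv, Relation.ReflTransGen.refl⟩
  · intro v hv hvq
    exact absurd ((PySem.Set.mem_ofList starts v).mp hv) hvq
  · intro v hv
    exact List.mem_append.mpr (Or.inl ((PySem.Set.mem_ofList starts v).mp hv))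
  · -- card (starts ∪ flat) ≤ |set(starts)| + |flat|
    have h1 : (starts ++ adjacency.flatMap Prod.snd).toFinset.card ≤
        starts.toFinset.card + (adjacency.flatMap Prod.snd).toFinset.card := by
      rw [List.toFinset_append]
      exact Finset.card_union_le _ _
    have h2 : (PySem.Set.ofList starts).length = starts.toFinset.card := by
      have hnd := PySem.Set.nodup_ofList starts
      have : (PySem.Set.ofList starts).toFinset = starts.toFinset := by
        apply Finset.ext
        intro x
        simp [PySem.Set.mem_ofList]
      rw [← List.toFinset_card_of_nodup hnd, this]
    have h3 : (adjacency.flatMap Prod.snd).toFinset.card ≤ (adjacency.flatMap Prod.snd).length :=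
      List.toFinset_card_le _
    omega

-- the two characterisations agree
lemma pvProp_iff (target : String) (starts : List String) (adjacency : List (String × List String)) :
    (∃ s ∈ starts, s = target ∨
        ∃ u, Relation.ReflTransGen (pvStep adjacency) s u ∧ target ∈ pvNeigh adjacency u) ↔
      ∃ s ∈ starts, Relation.ReflTransGen (pvStep adjacency) s target := by
  constructor
  · rintro ⟨s, hs, h | ⟨u, hru, htu⟩⟩
    · exact ⟨s, hs, h ▸ Relation.ReflTransGen.refl⟩
    · exact ⟨s, hs, hru.tail (htu : pvStep adjacency u target)⟩
  · rintro ⟨s, hs, hr⟩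
    rcases Relation.ReflTransGen.cases_tail hr with h | ⟨u, hru, htu⟩
    · exact ⟨s, hs, Or.inl h.symm⟩
    · exact ⟨s, hs, Or.inr ⟨u, hru, htu⟩⟩

-- ===== VERDICT (by name: the statement is the Claim_ definition above) =====
theorem reachable_from_any_py_spec : Claim_equal_reachable_from_any_py := by
  intro target starts adjacency _
  unfold Spec_reachable_from_any_py
  have hA := pvAnyStart_iff target adjacency starts
  have hB := pvAlt_iff target starts adjacency
  have : reachable_from_any_py target starts adjacency = true ↔
      reachable_from_any_py_alt target starts adjacency = true := by
    rw [show reachable_from_any_py target starts adjacency = pvAnyStart target adjacency starts from rfl,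
      hA, hB]
    exact pvProp_iff target starts adjacency
  cases hx : reachable_from_any_py target starts adjacency <;>
    cases hy : reachable_from_any_py_alt target starts adjacency <;>
    simp_all
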